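-- pv_equiv track=rewrite | github.com/AriqHibatullah/StatPub-Checker | suggest.py | symspell_candidates
-- ===== SOURCE A (Python) =====
-- from typing import Dict, List, Tuple, Set, Any
--
-- def gen_deletes(term: str, max_edit: int = 2, prefix_len: int = 7) -> Set[str]:
--     t = term[:prefix_len] if prefix_len and len(term) > prefix_len else term
--     out = {t}
--     for _ in range(max_edit):
--         new = set()
--         for s in out:
--             if len(s) <= 1:
--                 continue
--             for i in range(len(s)):
--                 new.add(s[:i] + s[i+1:])
--         out |= new
--     out.discard(t)
--     return out
--
-- def symspell_candidates(term: str, index: Dict[str, Set[str]], vocab: Set[str],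
--                         max_edit: int = 2, prefix_len: int = 7) -> Set[str]:
--     if term in vocab:
--         return {term}
--
--     keys = gen_deletes(term, max_edit=max_edit, prefix_len=prefix_len)
--     keys.add(term[:prefix_len] if prefix_len and len(term) > prefix_len else term)
--
--     out = set()
--     for k in keys:
--         if k in index:
--             out |= index[k]
--     return out
-- ===== SOURCE B (Python) =====
-- def symspell_candidates(term, index, vocab, max_edit=2, prefix_len=7):
--     if term in vocab:
--         return {term}
--     t = term[:prefix_len] if prefix_len and len(term) > prefix_len else term
--
--     def deeper(level, depth):
--         # canonical recursive SymSpell enumeration: the deletes one level down,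
--         # then recurse on that level for the remaining depth
--         if depth <= 0:
--             return []
--         nxt = list(dict.fromkeys(s[:i] + s[i + 1:]
--                                  for s in level if len(s) > 1
--                                  for i in range(len(s))))
--         return nxt + (deeper(nxt, depth - 1) if nxt else [])
--
--     out = set()
--     for k in deeper([t], max_edit) + [t]:
--         out.update(index.get(k, ()))
--     return out
-- ===== Notes on version B (the rewrite author's own statement) =====
-- stated objective: alternative
-- what changed: gen_deletes' iterative fixed-point set expansion (each of max_edit rounds re-scans the whole accumulated set, regenerates every string's deletes, unions them in, and finally discards and re-adds the seed) is replaced by the canonical recursive SymSpell enumeration: a helper that produces the next deletion level and recurses on it for the remaining depth (stopping early when a level is empty), returning all keys as one flat list with the seed appended once; hits are collected with index.get instead of a membership test plus union.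
import Mathlib
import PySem

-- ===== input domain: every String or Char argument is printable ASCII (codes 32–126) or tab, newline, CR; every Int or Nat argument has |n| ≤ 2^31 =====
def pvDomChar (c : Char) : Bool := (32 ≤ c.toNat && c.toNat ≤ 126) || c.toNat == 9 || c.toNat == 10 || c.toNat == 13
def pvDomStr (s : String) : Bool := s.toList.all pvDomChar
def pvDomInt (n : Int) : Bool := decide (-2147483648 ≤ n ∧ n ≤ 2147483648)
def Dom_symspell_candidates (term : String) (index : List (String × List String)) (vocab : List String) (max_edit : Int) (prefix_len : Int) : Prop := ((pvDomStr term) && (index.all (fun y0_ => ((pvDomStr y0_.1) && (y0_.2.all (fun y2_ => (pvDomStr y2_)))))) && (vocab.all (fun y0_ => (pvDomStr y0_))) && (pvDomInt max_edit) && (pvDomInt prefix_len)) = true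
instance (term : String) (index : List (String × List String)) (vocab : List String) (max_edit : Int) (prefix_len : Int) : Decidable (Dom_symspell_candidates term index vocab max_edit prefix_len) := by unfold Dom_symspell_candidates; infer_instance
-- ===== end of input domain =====

-- B replaces A's iterative fixed-point set expansion (each round re-expands the whole
-- accumulated set, with a final discard/re-add of the seed) by the canonical recursive
-- SymSpell enumeration: a helper recursing level by level on the remaining depth, keys
-- returned as one flat list with the seed appended once; hits via index.get, no
-- membership test. Same return value (a set of candidate strings).

-- ===== PORT A =====
-- one round of A's `for _ in range(max_edit)` body: new = deletes of every s in out; out |= new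
def pvStepA (out : PySem.Set String) : PySem.Set String :=
  let new : PySem.Set String := out.foldl (fun new s =>
      if PySem.Str.len s ≤ 1 then new
      else (PySem.List.pyRange 0 (PySem.Str.len s) 1).foldl
        (fun new i => PySem.Set.add new
          (PySem.Str.slice s none (some i) ++ PySem.Str.slice s (some (i+1)) none)) new)
    PySem.Set.empty
  PySem.Set.union out new

-- `for _ in range(max_edit)`: the loop body runs max_edit.toNat times
def pvLoopA (out : PySem.Set String) : Nat → PySem.Set String
  | 0 => out
  | n+1 => pvLoopA (pvStepA out) n

def gen_deletes (term : String) (max_edit : Int) (prefix_len : Int) : PySem.Set String :=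
  let t := if prefix_len ≠ 0 ∧ prefix_len < PySem.Str.len term
           then PySem.Str.slice term none (some prefix_len) else term
  let out : PySem.Set String := [t]
  let out := pvLoopA out max_edit.toNat
  PySem.Set.discard out t

def symspell_candidates (term : String) (index : List (String × List String)) (vocab : List String) (max_edit : Int) (prefix_len : Int) : List String :=
  if PySem.Set.contains vocab term then [term]
  else
    let keys := gen_deletes term max_edit prefix_len
    let keys := PySem.Set.add keys
      (if prefix_len ≠ 0 ∧ prefix_len < PySem.Str.len term
       then PySem.Str.slice term none (some prefix_len) else term)
    keys.foldl (fun out k =>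
      if (PySem.Dict.mk index).contains k
      then PySem.Set.union out ((PySem.Dict.mk index).getD k []) else out) PySem.Set.empty

-- ===== PORT B =====
-- B's recursive helper `deeper(level, depth)`: the next deletion level (ordered dedup),
-- followed by the keys the recursion yields from it at depth-1
def pvDeeper (level : List String) (depth : Int) : List String :=
  if depth ≤ 0 then []
  else
    let nxt := PySem.List.dedup (level.flatMap (fun s =>
      if 1 < PySem.Str.len s then
        (PySem.List.pyRange 0 (PySem.Str.len s) 1).map (fun i =>
          PySem.Str.slice s none (some i) ++ PySem.Str.slice s (some (i+1)) none)
      else []))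
    nxt ++ (if nxt.isEmpty then [] else pvDeeper nxt (depth - 1))
termination_by depth.toNat
decreasing_by omega

def symspell_candidates_alt (term : String) (index : List (String × List String)) (vocab : List String) (max_edit : Int) (prefix_len : Int) : List String :=
  if PySem.Set.contains vocab term then [term]
  else
    let t := if prefix_len ≠ 0 ∧ prefix_len < PySem.Str.len term
             then PySem.Str.slice term none (some prefix_len) else term
    (pvDeeper [t] max_edit ++ [t]).foldl (fun out k =>
      PySem.Set.update out ((PySem.Dict.mk index).getD k [])) PySem.Set.empty

-- ===== PRECONDITION & SPEC =====
def Spec_symspell_candidates (term : String) (index : List (String × List String)) (vocab : List String) (max_edit : Int) (prefix_len : Int) (out : List String) : Prop := out = symspell_candidates_alt term index vocab max_edit prefix_len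
instance (term : String) (index : List (String × List String)) (vocab : List String) (max_edit : Int) (prefix_len : Int) (out : List String) : Decidable (Spec_symspell_candidates term index vocab max_edit prefix_len out) := by unfold Spec_symspell_candidates; infer_instance

-- ===== CLAIM (what is proved, stated in full; the proofs are below) =====
def Claim_equal_symspell_candidates : Prop := ∀ (term : String) (index : List (String × List String)) (vocab : List String) (max_edit : Int) (prefix_len : Int), Dom_symspell_candidates term index vocab max_edit prefix_len → Spec_symspell_candidates term index vocab max_edit prefix_len (symspell_candidates term index vocab max_edit prefix_len)

-- ===== LEMMAS AND PROOFS =====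

-- the single-character-removal candidates of s, in index order (shared shape of both ports)
def pvDels (s : String) : List String :=
  (PySem.List.pyRange 0 (PySem.Str.len s) 1).map (fun i =>
    PySem.Str.slice s none (some i) ++ PySem.Str.slice s (some (i+1)) none)

-- the flat stream of deletes generated from the list l (A's guard shape)
def pvFlat (l : List String) : List String :=
  l.flatMap (fun s => if PySem.Str.len s ≤ 1 then [] else pvDels s)

-- level k of the delete BFS from seed t
def pvLvl (t : String) : Nat → List String
  | 0 => [t]
  | n+1 => PySem.Set.ofList (pvFlat (pvLvl t n))

-- concatenation of levels 1..n
def pvCat (t : String) (n : Nat) : List String :=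
  (List.range n).flatMap (fun k => pvLvl t (k+1))

theorem pvLoopA_iter (out : PySem.Set String) : ∀ n, pvLoopA out n = pvStepA^[n] out := by
  intro n
  induction n generalizing out with
  | zero => rfl
  | succ n ih => rw [pvLoopA, ih, Function.iterate_succ_apply]

-- once a level is empty, all later levels are empty
theorem pvLvl_stab (t : String) (m : Nat) (hm : pvLvl t m = []) :
    ∀ i, pvLvl t (m + i) = [] := by
  intro i
  induction i with
  | zero => exact hm
  | succ i ih =>
    show pvLvl t ((m + i) + 1) = []
    unfold pvLvl
    rw [ih]
    rfl

theorem pvDels_len (s x : String) (hx : x ∈ pvDels s) :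
    x.toList.length + 1 = s.toList.length := by
  unfold pvDels at hx
  rcases List.mem_map.mp hx with ⟨i, hi, rfl⟩
  rcases PySem.List.mem_pyRange_one.mp hi with ⟨h0, h1⟩
  rw [PySem.Str.len_eq] at h1
  have h2 : (PySem.Str.slice s none (some i)).toList = s.toList.take i.toNat := by
    rw [PySem.Str.toList_slice, PySem.Chars.slice_eq_listSlice]
    exact PySem.List.slice_to _ h0
  have h3 : (PySem.Str.slice s (some (i+1)) none).toList = s.toList.drop (i+1).toNat := by
    rw [PySem.Str.toList_slice, PySem.Chars.slice_eq_listSlice]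
    exact PySem.List.slice_from _ (by omega)
  have h4 : (PySem.Str.slice s none (some i) ++ PySem.Str.slice s (some (i+1)) none).toList
      = s.toList.take i.toNat ++ s.toList.drop (i+1).toNat := by
    rw [String.toList_append, h2, h3]
  rw [h4, List.length_append, List.length_take, List.length_drop]
  omega

theorem pvLvl_len (t : String) : ∀ n x, x ∈ pvLvl t n → x.toList.length + n = t.toList.length := by
  intro n
  induction n with
  | zero => intro x hx; simp [pvLvl] at hx; simp [hx]
  | succ n ih =>
    intro x hx
    unfold pvLvl at hx
    rw [PySem.Set.mem_ofList] at hx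
    unfold pvFlat at hx
    rcases List.mem_flatMap.mp hx with ⟨s, hs, hxs⟩
    by_cases hle : PySem.Str.len s ≤ 1
    · rw [if_pos hle] at hxs; simp at hxs
    · rw [if_neg hle] at hxs
      have e1 := pvDels_len s x hxs
      have e2 := ih s hs
      omega

theorem pvFlat_len (t : String) (k : Nat) (y : String) (hy : y ∈ pvFlat (pvLvl t k)) :
    y.toList.length + (k + 1) = t.toList.length := by
  unfold pvFlat at hy
  rcases List.mem_flatMap.mp hy with ⟨s, hs, hys⟩
  by_cases hle : PySem.Str.len s ≤ 1
  · rw [if_pos hle] at hys; simp at hys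
  · rw [if_neg hle] at hys
    have e1 := pvDels_len s y hys
    have e2 := pvLvl_len t k s hs
    omega

theorem pvCat_len (t : String) (n : Nat) (y : String) (hy : y ∈ pvCat t n) :
    ∃ k, k < n ∧ y.toList.length + (k + 1) = t.toList.length := by
  unfold pvCat at hy
  rcases List.mem_flatMap.mp hy with ⟨k, hk, hyk⟩
  exact ⟨k, List.mem_range.mp hk, pvLvl_len t (k+1) y hyk⟩

theorem pvCat_succ (t : String) (n : Nat) :
    pvCat t (n+1) = pvCat t n ++ pvLvl t (n+1) := by
  unfold pvCat
  rw [List.range_succ, List.flatMap_append, List.flatMap_cons, List.flatMap_nil, List.append_nil]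

theorem pvCat_not_mem (t : String) (n : Nat) : t ∉ pvCat t n := by
  intro h
  rcases pvCat_len t n t h with ⟨k, _, hk⟩
  omega

theorem pvOfList_append_disjoint (xs ys : List String) (h : ∀ y ∈ ys, y ∉ xs) :
    PySem.Set.ofList (xs ++ ys) = PySem.Set.ofList xs ++ PySem.Set.ofList ys := by
  rw [PySem.Set.ofList_append, PySem.Set.update_eq_append_filter]
  congr 1
  apply List.filter_eq_self.mpr
  intro y hy
  have hys : y ∈ ys := (PySem.Set.mem_ofList ys y).mp hy
  have hnx : y ∉ PySem.Set.ofList xs := fun hmem => h y hys ((PySem.Set.mem_ofList xs y).mp hmem)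
  simp only [Bool.not_eq_true']
  exact (Bool.not_eq_true _).mp (fun hc => hnx ((PySem.Set.contains_iff _ _).mp hc))

theorem pvNewBlocks (t : String) (n : Nat) :
    PySem.Set.ofList ((List.range n).flatMap (fun k => pvFlat (pvLvl t k)))
      = (List.range n).flatMap (fun k => pvLvl t (k+1)) := by
  induction n with
  | zero => simp [PySem.Set.ofList]
  | succ n ih =>
    rw [List.range_succ, List.flatMap_append, List.flatMap_cons, List.flatMap_nil,
        List.append_nil, List.flatMap_append, List.flatMap_cons, List.flatMap_nil, List.append_nil]
    rw [pvOfList_append_disjoint _ _ ?disj, ih]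
    · show _ ++ _ = _ ++ pvLvl t (n+1)
      rfl
    case disj =>
      intro y hy hmem
      have e1 := pvFlat_len t n y hy
      rcases List.mem_flatMap.mp hmem with ⟨k, hk, hyk⟩
      have e2 := pvFlat_len t k y hyk
      have := List.mem_range.mp hk
      omega

theorem pvBlocksNodup (t : String) (n : Nat) :
    ((List.range n).flatMap (fun k => pvLvl t (k+1))).Nodup := by
  induction n with
  | zero => simp
  | succ n ih =>
    rw [List.range_succ, List.flatMap_append, List.flatMap_cons, List.flatMap_nil, List.append_nil]
    refine List.Nodup.append ih ?_ ?_
    · show (PySem.Set.ofList (pvFlat (pvLvl t n))).Nodup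
      exact PySem.Set.nodup_ofList _
    · intro y hy hy2
      rcases List.mem_flatMap.mp hy with ⟨k, hk, hyk⟩
      have e1 := pvLvl_len t (k+1) y hyk
      have e2 := pvLvl_len t (n+1) y hy2
      have := List.mem_range.mp hk
      omega

theorem pvInner (l : List String) (acc : PySem.Set String) :
    l.foldl (fun new s =>
      if PySem.Str.len s ≤ 1 then new
      else (PySem.List.pyRange 0 (PySem.Str.len s) 1).foldl
        (fun new i => PySem.Set.add new
          (PySem.Str.slice s none (some i) ++ PySem.Str.slice s (some (i+1)) none)) new) acc
      = PySem.Set.update acc (pvFlat l) := by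
  induction l generalizing acc with
  | nil => simp [pvFlat, PySem.Set.update_nil]
  | cons s l ih =>
    rw [List.foldl_cons]
    show _ = PySem.Set.update acc (pvFlat (s :: l))
    unfold pvFlat
    rw [List.flatMap_cons, PySem.Set.update_append]
    by_cases h : PySem.Str.len s ≤ 1
    · rw [if_pos h, if_pos h, PySem.Set.update_nil]
      exact ih acc
    · rw [if_neg h, if_neg h, ← PySem.Set.update_map_eq_foldl_add]
      exact ih _

theorem pvStepA_cat (t : String) (n : Nat) :
    pvStepA (t :: pvCat t n) = t :: pvCat t (n+1) := by
  unfold pvStepA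
  rw [pvInner, PySem.Set.update_empty]
  have hflat : pvFlat (t :: pvCat t n) = (List.range (n+1)).flatMap (fun k => pvFlat (pvLvl t k)) := by
    have h1 : pvFlat (t :: pvCat t n) = pvFlat [t] ++ pvFlat (pvCat t n) := by
      unfold pvFlat
      rw [← List.flatMap_append]
      rfl
    have h2 : pvFlat (pvCat t n)
        = (List.map Nat.succ (List.range n)).flatMap (fun k => pvFlat (pvLvl t k)) := by
      unfold pvCat pvFlat
      rw [List.flatMap_assoc, List.flatMap_map]
    rw [h1, h2, List.range_succ_eq_map, List.flatMap_cons]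
    rfl
  rw [hflat, pvNewBlocks t (n+1)]
  show PySem.Set.update _ _ = _
  rw [PySem.Set.update_eq_append_filter,
      PySem.Set.ofList_eq_self_of_nodup _ (pvBlocksNodup t (n+1))]
  rw [List.range_succ, List.flatMap_append, List.flatMap_cons, List.flatMap_nil, List.append_nil,
      List.filter_append]
  have h1 : ((List.range n).flatMap (fun k => pvLvl t (k+1))).filter
      (fun y => !(PySem.Set.contains (t :: pvCat t n) y)) = [] := by
    apply List.filter_eq_nil_iff.mpr
    intro y hy
    have : y ∈ t :: pvCat t n := List.mem_cons_of_mem t hy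
    simp only [Bool.not_eq_true', Bool.not_eq_false]
    exact (PySem.Set.contains_iff _ _).mpr this
  have h2 : (pvLvl t (n+1)).filter
      (fun y => !(PySem.Set.contains (t :: pvCat t n) y)) = pvLvl t (n+1) := by
    apply List.filter_eq_self.mpr
    intro y hy
    have e1 := pvLvl_len t (n+1) y hy
    have hnm : y ∉ (t :: pvCat t n) := by
      intro hmem
      rcases List.mem_cons.mp hmem with h | h
      · subst h; omega
      · rcases pvCat_len t n y h with ⟨k, hk, hk2⟩; omega
    simp only [Bool.not_eq_true']
    exact (Bool.not_eq_true _).mp (fun hc => hnm ((PySem.Set.contains_iff _ _).mp hc))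
  rw [show ((List.range n).flatMap (fun k => pvLvl t (k+1))) = pvCat t n from rfl] at h1
  rw [show ((List.range n).flatMap (fun k => pvLvl t (k+1))) = pvCat t n from rfl]
  rw [h1, h2, pvCat_succ, List.nil_append, List.cons_append]

theorem pvIterA (t : String) (n : Nat) : pvStepA^[n] [t] = t :: pvCat t n := by
  induction n with
  | zero => simp [pvCat]
  | succ n ih => rw [Function.iterate_succ_apply', ih, pvStepA_cat]

theorem pvKeysA (t : String) (n : Nat) :
    PySem.Set.add (PySem.Set.discard (t :: pvCat t n) t) t = pvCat t n ++ [t] := by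
  have hd : PySem.Set.discard (t :: pvCat t n) t = pvCat t n := by
    show List.filter _ _ = _
    rw [List.filter_cons]
    simp only [BEq.rfl, Bool.not_true, Bool.false_eq_true, if_false]
    apply List.filter_eq_self.mpr
    intro y hy
    have : y ≠ t := fun h => pvCat_not_mem t n (h ▸ hy)
    simp [this]
  rw [hd, PySem.Set.add_of_not_mem (pvCat_not_mem t n)]

-- B's recursion, expressed through the same levels: from level k at depth d it yields
-- levels k+1 .. k+d.toNat concatenated
theorem pvDeeper_lvl (t : String) : ∀ (n : Nat) (d : Int), d.toNat = n → ∀ (k : Nat),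
    pvDeeper (pvLvl t k) d = (List.range n).flatMap (fun j => pvLvl t (k+1+j)) := by
  intro n
  induction n with
  | zero =>
    intro d hd k
    unfold pvDeeper
    rw [if_pos (by omega)]
    simp
  | succ n ih =>
    intro d hd k
    unfold pvDeeper
    rw [if_neg (by omega)]
    have hfun : (fun s => if 1 < PySem.Str.len s then
        (PySem.List.pyRange 0 (PySem.Str.len s) 1).map (fun i =>
          PySem.Str.slice s none (some i) ++ PySem.Str.slice s (some (i+1)) none)
        else ([] : List String))
        = (fun s => if PySem.Str.len s ≤ 1 then [] else pvDels s) := by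
      funext s
      by_cases h : PySem.Str.len s ≤ 1
      · rw [if_neg (by omega), if_pos h]
      · rw [if_pos (by omega), if_neg h]; rfl
    have hnxt : PySem.List.dedup ((pvLvl t k).flatMap (fun s =>
        if 1 < PySem.Str.len s then
          (PySem.List.pyRange 0 (PySem.Str.len s) 1).map (fun i =>
            PySem.Str.slice s none (some i) ++ PySem.Str.slice s (some (i+1)) none)
        else [])) = pvLvl t (k+1) := by
      rw [hfun]
      rfl
    simp only [hnxt]
    by_cases he : pvLvl t (k+1) = []
    · rw [he]
      simp only [List.isEmpty_nil, if_true, List.nil_append]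
      symm
      apply List.flatMap_eq_nil_iff.mpr
      intro j _
      have : pvLvl t ((k+1) + j) = [] := pvLvl_stab t (k+1) he j
      rw [show k+1+j = (k+1)+j from by omega] at *
      exact this
    · rw [if_neg (by simpa using he)]
      rw [ih (d-1) (by omega) (k+1)]
      rw [List.range_succ_eq_map, List.flatMap_cons, List.flatMap_map]
      congr 1
      refine List.flatMap_congr ?_
      intro j _
      congr 1
      omega

theorem pvKeysB (t : String) (n : Nat) (d : Int) (hd : d.toNat = n) :
    pvDeeper [t] d = pvCat t n := by
  have h := pvDeeper_lvl t n d hd 0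
  rw [show pvLvl t 0 = [t] from rfl] at h
  rw [h]
  unfold pvCat
  refine List.flatMap_congr ?_
  intro j _
  congr 1
  omega

-- the two union loops agree key by key: a missing key contributes nothing either way
theorem pvFold_eq (index : List (String × List String)) :
    ∀ (keys : List String) (acc : List String),
      keys.foldl (fun out k =>
        if (PySem.Dict.mk index).contains k
        then PySem.Set.union out ((PySem.Dict.mk index).getD k []) else out) acc
      = keys.foldl (fun out k =>
        PySem.Set.update out ((PySem.Dict.mk index).getD k [])) acc := by
  intro keys
  induction keys with
  | nil => intro acc; rfl
  | cons k keys ih =>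
    intro acc
    rw [List.foldl_cons, List.foldl_cons, ih]
    by_cases h : (PySem.Dict.mk index).contains k
    · rw [if_pos h]
      rfl
    · rw [if_neg h]
      have hg : (PySem.Dict.mk index).getD k [] = [] :=
        PySem.Dict.getD_of_not_contains _ _ (Bool.eq_false_iff.mpr h)
      rw [hg, PySem.Set.update_nil]

-- ===== VERDICT (by name: the statement is the Claim_ definition above) =====
theorem symspell_candidates_spec : Claim_equal_symspell_candidates := by
  intro term index vocab max_edit prefix_len _
  unfold Spec_symspell_candidates symspell_candidates symspell_candidates_alt gen_deletes
  by_cases hv : PySem.Set.contains vocab term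
  · simp only [hv, if_true]
  · simp only [hv, if_false, Bool.false_eq_true]
    rw [pvLoopA_iter, pvIterA, pvKeysA, pvKeysB _ max_edit.toNat max_edit rfl, pvFold_eq]
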